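-- pv_equiv track=rewrite | github.com/dwchoi95/mentored | src/transform/nodeMap.py | rep_node_map
-- ===== SOURCE A (Python) =====
-- def rep_node_map(a_trace_node_map:dict, b_trace_node_map:dict) -> dict:
--     rep_node_map = {}
--     a_nodes = []
--     a_node_names = []
--     for k, v in reversed(list(a_trace_node_map.items())):
--         a_nodes.append(k)
--         a_node_names.append(v)
--
--     b_nodes = []
--     b_node_names = []
--     for k, v in reversed(list(b_trace_node_map.items())):
--         b_nodes.append(k)
--         b_node_names.append(v)
--
--     # Initialize a 2D array to store the lengths of LCS
--     dp = [[0] * (len(b_node_names) + 1) for _ in range(len(a_node_names) + 1)]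
--
--     # Calculate the dp array
--     for i in range(1, len(a_node_names) + 1):
--         for j in range(1, len(b_node_names) + 1):
--             if a_node_names[i - 1] == b_node_names[j - 1]:
--                 dp[i][j] = dp[i - 1][j - 1] + 1
--             else:
--                 dp[i][j] = max(dp[i - 1][j], dp[i][j - 1])
--
--     # Node mapping with LCS
--     # Crossover: rep Node Mapping
--     i, j = len(a_node_names), len(b_node_names)
--     while i > 0 and j > 0:
--         if a_node_names[i - 1] == b_node_names[j - 1]:
--             a_node = a_nodes[i - 1]
--             b_node = b_nodes[j - 1]
--             rep_node_map[a_node] = b_node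
--             i -= 1
--             j -= 1
--         elif dp[i - 1][j] > dp[i][j - 1]:
--             i -= 1
--         else:
--             j -= 1
--
--     return rep_node_map
-- ===== SOURCE B (Python) =====
-- def rep_node_map(a_trace_node_map: dict, b_trace_node_map: dict) -> dict:
--     a_items = list(reversed(a_trace_node_map.items()))
--     b_items = list(reversed(b_trace_node_map.items()))
--     a_nodes = [k for k, _ in a_items]
--     a_names = [v for _, v in a_items]
--     b_nodes = [k for k, _ in b_items]
--     b_names = [v for _, v in b_items]
--
--     cache = {}
--
--     def lcs(i, j):
--         # top-down memoized LCS length of a_names[:i] and b_names[:j]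
--         if i == 0 or j == 0:
--             return 0
--         key = (i, j)
--         if key in cache:
--             return cache[key]
--         if a_names[i - 1] == b_names[j - 1]:
--             r = lcs(i - 1, j - 1) + 1
--         else:
--             r = max(lcs(i - 1, j), lcs(i, j - 1))
--         cache[key] = r
--         return r
--
--     result = {}
--     i, j = len(a_names), len(b_names)
--     while i > 0 and j > 0:
--         if a_names[i - 1] == b_names[j - 1]:
--             result[a_nodes[i - 1]] = b_nodes[j - 1]
--             i -= 1
--             j -= 1
--         elif lcs(i - 1, j) > lcs(i, j - 1):
--             i -= 1
--         else:
--             j -= 1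
--     return result
-- ===== Notes on version B (the rewrite author's own statement) =====
-- stated objective: alternative
-- what changed: Replaces the full bottom-up (len_a+1)x(len_b+1) dp table with a top-down memoized recursive lcs(i,j) helper (cache keyed on (i,j)), computing only the LCS cells the equality structure and the backtracking walk actually demand, while keeping A's exact reversed ordering and >-vs-else tie-break.
import Mathlib
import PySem

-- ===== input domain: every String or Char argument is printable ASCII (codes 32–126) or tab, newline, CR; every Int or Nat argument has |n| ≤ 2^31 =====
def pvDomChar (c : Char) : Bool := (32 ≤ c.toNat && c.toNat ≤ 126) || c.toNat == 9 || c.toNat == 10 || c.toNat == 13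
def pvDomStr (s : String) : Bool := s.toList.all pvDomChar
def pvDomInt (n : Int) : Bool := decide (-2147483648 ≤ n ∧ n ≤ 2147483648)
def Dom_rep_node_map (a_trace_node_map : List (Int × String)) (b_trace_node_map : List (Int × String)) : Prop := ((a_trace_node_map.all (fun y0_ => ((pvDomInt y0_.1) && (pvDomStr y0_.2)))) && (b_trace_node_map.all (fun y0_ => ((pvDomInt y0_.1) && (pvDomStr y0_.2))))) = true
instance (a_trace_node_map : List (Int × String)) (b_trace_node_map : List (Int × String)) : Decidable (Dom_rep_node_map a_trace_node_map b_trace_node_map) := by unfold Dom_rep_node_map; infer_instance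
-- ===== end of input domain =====

-- B replaces A's full bottom-up LCS dp table by a top-down memoized recursive lcs(i,j) helper
-- (a cache keyed on (i,j)); the reversed ordering and the backtracking tie-break are unchanged.


-- ===== PORT A =====
-- one inner-loop body: dp[i][j] = dp[i-1][j-1]+1 / max(dp[i-1][j], dp[i][j-1])
def dpStep (an bn : List String) (i : Nat) (dp : List (List Nat)) (j : Nat) : List (List Nat) :=
  let v := if an.getD (i-1) "" == bn.getD (j-1) "" then (dp.getD (i-1) []).getD (j-1) 0 + 1
           else max ((dp.getD (i-1) []).getD j 0) ((dp.getD i []).getD (j-1) 0)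
  dp.set i ((dp.getD i []).set j v)

-- 'for j in range(1, len(b_node_names) + 1)'
def dpRow (an bn : List String) (dp : List (List Nat)) (i : Nat) : List (List Nat) :=
  (List.range' 1 bn.length).foldl (dpStep an bn i) dp

-- dp initialisation and 'for i in range(1, len(a_node_names) + 1)'
def dpTable (an bn : List String) : List (List Nat) :=
  (List.range' 1 an.length).foldl (dpRow an bn)
    (List.replicate (an.length + 1) (List.replicate (bn.length + 1) 0))

-- the 'while i > 0 and j > 0' backtracking loop (terminates because i + j decreases)
def walkA (an bn : List String) (anodes bnodes : List Int) (dp : List (List Nat)) :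
    Nat → Nat → PySem.Dict Int Int → PySem.Dict Int Int
  | i+1, j+1, m =>
    if an.getD i "" == bn.getD j "" then
      walkA an bn anodes bnodes dp i j (m.insert (anodes.getD i 0) (bnodes.getD j 0))
    else if (dp.getD i []).getD (j+1) 0 > (dp.getD (i+1) []).getD j 0 then
      walkA an bn anodes bnodes dp i (j+1) m
    else
      walkA an bn anodes bnodes dp (i+1) j m
  | _, _, m => m
  termination_by i j _ => i + j

def rep_node_map (a_trace_node_map : List (Int × String)) (b_trace_node_map : List (Int × String)) : List (Int × Int) :=
  let aRev := (PySem.Dict.ofList a_trace_node_map).items.reverse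
  let pa := aRev.foldl (fun (acc : List Int × List String) kv => (acc.1 ++ [kv.1], acc.2 ++ [kv.2])) ([], [])
  let bRev := (PySem.Dict.ofList b_trace_node_map).items.reverse
  let pb := bRev.foldl (fun (acc : List Int × List String) kv => (acc.1 ++ [kv.1], acc.2 ++ [kv.2])) ([], [])
  let dp := dpTable pa.2 pb.2
  (walkA pa.2 pb.2 pa.1 pb.1 dp pa.2.length pb.2.length PySem.Dict.empty).items

-- ===== PORT B =====
-- top-down memoized lcs(i, j); returns the value and the updated cache
def lcsMemo (an bn : List String) : Nat → Nat → PySem.Dict (Nat × Nat) Nat → Nat × PySem.Dict (Nat × Nat) Nat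
  | 0, _, c => (0, c)
  | _+1, 0, c => (0, c)
  | i+1, j+1, c =>
    match c.get? (i+1, j+1) with
    | some v => (v, c)
    | none =>
      let r := if an.getD i "" == bn.getD j "" then
          let p := lcsMemo an bn i j c
          (p.1 + 1, p.2)
        else
          let p1 := lcsMemo an bn i (j+1) c
          let p2 := lcsMemo an bn (i+1) j p1.2
          (max p1.1 p2.1, p2.2)
      (r.1, r.2.insert (i+1, j+1) r.1)
  termination_by i j _ => i + j

-- the backtracking while-loop of B, threading the memo cache
def walkB (an bn : List String) (anodes bnodes : List Int) :
    Nat → Nat → PySem.Dict (Nat × Nat) Nat → PySem.Dict Int Int → PySem.Dict Int Int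
  | i+1, j+1, c, m =>
    if an.getD i "" == bn.getD j "" then
      walkB an bn anodes bnodes i j c (m.insert (anodes.getD i 0) (bnodes.getD j 0))
    else
      let p1 := lcsMemo an bn i (j+1) c
      let p2 := lcsMemo an bn (i+1) j p1.2
      if p1.1 > p2.1 then walkB an bn anodes bnodes i (j+1) p2.2 m
      else walkB an bn anodes bnodes (i+1) j p2.2 m
  | _, _, _, m => m
  termination_by i j _ _ => i + j

def rep_node_map_alt (a_trace_node_map : List (Int × String)) (b_trace_node_map : List (Int × String)) : List (Int × Int) :=
  let a_items := (PySem.Dict.ofList a_trace_node_map).items.reverse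
  let b_items := (PySem.Dict.ofList b_trace_node_map).items.reverse
  let a_nodes := a_items.map Prod.fst
  let a_names := a_items.map Prod.snd
  let b_nodes := b_items.map Prod.fst
  let b_names := b_items.map Prod.snd
  (walkB a_names b_names a_nodes b_nodes a_names.length b_names.length PySem.Dict.empty PySem.Dict.empty).items

-- ===== PRECONDITION & SPEC =====
def Spec_rep_node_map (a_trace_node_map : List (Int × String)) (b_trace_node_map : List (Int × String)) (out : List (Int × Int)) : Prop := out = rep_node_map_alt a_trace_node_map b_trace_node_map
instance (a_trace_node_map : List (Int × String)) (b_trace_node_map : List (Int × String)) (out : List (Int × Int)) : Decidable (Spec_rep_node_map a_trace_node_map b_trace_node_map out) := by unfold Spec_rep_node_map; infer_instance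

-- ===== CLAIM (what is proved, stated in full; the proofs are below) =====
def Claim_equal_rep_node_map : Prop := ∀ (a_trace_node_map : List (Int × String)) (b_trace_node_map : List (Int × String)), Dom_rep_node_map a_trace_node_map b_trace_node_map → Spec_rep_node_map a_trace_node_map b_trace_node_map (rep_node_map a_trace_node_map b_trace_node_map)

-- ===== LEMMAS AND PROOFS =====

-- reference LCS-length function; both A's dp table and B's memo cache are proved to compute it
def lcsL (an bn : List String) : Nat → Nat → Nat
  | 0, _ => 0
  | _+1, 0 => 0
  | i+1, j+1 =>
    if an.getD i "" == bn.getD j "" then lcsL an bn i j + 1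
    else max (lcsL an bn i (j+1)) (lcsL an bn (i+1) j)
  termination_by i j => i + j

def cacheValid (an bn : List String) (c : PySem.Dict (Nat × Nat) Nat) : Prop :=
  ∀ p v, c.get? p = some v → v = lcsL an bn p.1 p.2

theorem cacheValid_insert (an bn : List String) (c : PySem.Dict (Nat × Nat) Nat)
    (i j : Nat) (hc : cacheValid an bn c) :
    cacheValid an bn (c.insert (i, j) (lcsL an bn i j)) := by
  intro q w h
  rw [PySem.Dict.get?_insert] at h
  split at h
  · next heq => cases h; subst heq; rfl
  · exact hc q w h

theorem lcsMemo_correct (an bn : List String) :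
    ∀ n i j c, i + j ≤ n → cacheValid an bn c →
      (lcsMemo an bn i j c).1 = lcsL an bn i j ∧ cacheValid an bn (lcsMemo an bn i j c).2 := by
  intro n
  induction n with
  | zero =>
    intro i j c hle hc
    have hi : i = 0 := by omega
    subst hi
    simpa [lcsMemo, lcsL] using hc
  | succ n ih =>
    intro i j c hle hc
    match i, j with
    | 0, j => simpa [lcsMemo, lcsL] using hc
    | i+1, 0 => simpa [lcsMemo, lcsL] using hc
    | i+1, j+1 =>
      rw [lcsMemo]
      cases hget : c.get? (i+1, j+1) with
      | some v =>
        simp only []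
        exact ⟨hc _ v hget, hc⟩
      | none =>
        simp only []
        by_cases heq : an.getD i "" == bn.getD j ""
        · simp only [heq, if_true]
          obtain ⟨h1, h2⟩ := ih i j c (by omega) hc
          have hval : lcsL an bn (i+1) (j+1) = lcsL an bn i j + 1 := by
            rw [lcsL, if_pos heq]
          constructor
          · simp [h1, hval]
          · simp only [h1]
            rw [← hval]
            exact cacheValid_insert an bn _ _ _ h2
        · simp only [heq]
          obtain ⟨h1, h2⟩ := ih i (j+1) c (by omega) hc
          obtain ⟨h3, h4⟩ := ih (i+1) j _ (by omega) h2
          have hval : lcsL an bn (i+1) (j+1) = max (lcsL an bn i (j+1)) (lcsL an bn (i+1) j) := by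
            rw [lcsL, if_neg heq]
          constructor
          · simp [h1, h3, hval]
          · simp only [h1, h3]
            rw [← hval]
            exact cacheValid_insert an bn _ _ _ h4

-- dp-table invariant: rows < i final, row i filled up to column c, rows > i still zero
def RowOK (an bn : List String) (T : List (List Nat)) (i c : Nat) : Prop :=
  T.length = an.length + 1 ∧
  (∀ i', i' ≤ an.length → (T.getD i' []).length = bn.length + 1) ∧
  (∀ i' j, i' ≤ an.length → j ≤ bn.length →
    (T.getD i' []).getD j 0 =
      if i' < i then lcsL an bn i' j
      else if i' = i then (if j ≤ c then lcsL an bn i' j else 0)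
      else 0)

theorem getD_set_eq_pv (l : List (List Nat)) (i : Nat) (a d : List Nat) (h : i < l.length) :
    (l.set i a).getD i d = a := by
  simp [List.getD, h]

theorem getD_set_ne_pv (l : List (List Nat)) (i i' : Nat) (a d : List Nat) (h : i' ≠ i) :
    (l.set i a).getD i' d = l.getD i' d := by
  unfold List.getD
  rw [List.getElem?_set, if_neg (fun hh => h hh.symm)]

theorem getD_set_eq_nat (l : List Nat) (i : Nat) (a d : Nat) (h : i < l.length) :
    (l.set i a).getD i d = a := by
  simp [List.getD, h]

theorem getD_set_ne_nat (l : List Nat) (i i' : Nat) (a d : Nat) (h : i' ≠ i) :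
    (l.set i a).getD i' d = l.getD i' d := by
  unfold List.getD
  rw [List.getElem?_set, if_neg (fun hh => h hh.symm)]

theorem dpStep_rowOK (an bn : List String) (T : List (List Nat)) (i c : Nat)
    (hi1 : 1 ≤ i) (hi : i ≤ an.length) (hc : c < bn.length) (h : RowOK an bn T i c) :
    RowOK an bn (dpStep an bn i T (c+1)) i (c+1) := by
  obtain ⟨hlen, hrow, hval⟩ := h
  obtain ⟨i0, rfl⟩ : ∃ i0, i = i0 + 1 := ⟨i - 1, by omega⟩
  unfold dpStep
  have hTi : i0 + 1 < T.length := by omega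
  have hrowlen : (T.getD (i0+1) []).length = bn.length + 1 := hrow _ hi
  refine ⟨by simpa using hlen, ?_, ?_⟩
  · intro i' hi'
    by_cases hii : i' = i0 + 1
    · subst hii
      rw [getD_set_eq_pv _ _ _ _ hTi]
      simpa using hrowlen
    · rw [getD_set_ne_pv _ _ _ _ _ hii]
      exact hrow _ hi'
  · intro i' j hi' hj
    by_cases hii : i' = i0 + 1
    · subst hii
      rw [getD_set_eq_pv _ _ _ _ hTi]
      by_cases hjj : j = c + 1
      · subst hjj
        rw [getD_set_eq_nat _ _ _ _ (by omega)]
        have e1 : (T.getD i0 []).getD c 0 = lcsL an bn i0 c := by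
          rw [hval i0 c (by omega) (by omega), if_pos (by omega)]
        have e2 : (T.getD i0 []).getD (c+1) 0 = lcsL an bn i0 (c+1) := by
          rw [hval i0 (c+1) (by omega) (by omega), if_pos (by omega)]
        have e3 : (T.getD (i0+1) []).getD c 0 = lcsL an bn (i0+1) c := by
          rw [hval (i0+1) c (by omega) (by omega), if_neg (by omega), if_pos rfl, if_pos le_rfl]
        simp only [Nat.add_sub_cancel, if_neg (by omega : ¬ (i0+1:Nat) < i0+1),
          if_pos (le_refl (c+1))]
        rw [lcsL]
        by_cases heq : an.getD i0 "" == bn.getD c ""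
        · rw [if_pos heq, if_pos heq, e1]; simp
        · rw [if_neg heq, if_neg heq, e2, e3]; simp
      · rw [getD_set_ne_nat _ _ _ _ _ hjj]
        rw [hval (i0+1) j hi' hj]
        by_cases hjc : j ≤ c
        · rw [if_neg (by omega), if_pos rfl, if_pos hjc, if_neg (by omega), if_pos rfl,
            if_pos (by omega)]
        · rw [if_neg (by omega), if_pos rfl, if_neg hjc, if_neg (by omega), if_pos rfl,
            if_neg (by omega)]
    · rw [getD_set_ne_pv _ _ _ _ _ hii]
      rw [hval i' j hi' hj]
      by_cases h1 : i' < i0 + 1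
      · simp [h1]
      · simp [h1, hii]

theorem lcsL_zero_left (an bn : List String) (j : Nat) : lcsL an bn 0 j = 0 := by
  unfold lcsL; rfl

theorem lcsL_zero_right (an bn : List String) (i : Nat) : lcsL an bn i 0 = 0 := by
  cases i <;> (unfold lcsL; rfl)

theorem dpRow_rowOK (an bn : List String) (T : List (List Nat)) (i : Nat)
    (hi1 : 1 ≤ i) (hi : i ≤ an.length) (h : RowOK an bn T i 0) :
    RowOK an bn (dpRow an bn T i) i bn.length := by
  unfold dpRow
  suffices hs : ∀ t, t ≤ bn.length → RowOK an bn ((List.range' 1 t).foldl (dpStep an bn i) T) i t by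
    exact hs bn.length le_rfl
  intro t
  induction t with
  | zero => intro _; simpa using h
  | succ t iht =>
    intro ht
    rw [List.range'_1_concat, List.foldl_append, List.foldl_cons, List.foldl_nil,
      Nat.add_comm 1 t]
    exact dpStep_rowOK an bn _ i t hi1 hi (by omega) (iht (by omega))

theorem rowOK_succ (an bn : List String) (T : List (List Nat)) (i : Nat)
    (h : RowOK an bn T i bn.length) : RowOK an bn T (i+1) 0 := by
  obtain ⟨hlen, hrow, hval⟩ := h
  refine ⟨hlen, hrow, ?_⟩
  intro i' j hi' hj
  rw [hval i' j hi' hj]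
  by_cases h1 : i' < i
  · rw [if_pos h1, if_pos (by omega)]
  · by_cases h2 : i' = i
    · rw [if_neg h1, if_pos h2, if_pos hj, if_pos (by omega)]
    · by_cases h3 : i' = i + 1
      · rw [if_neg h1, if_neg h2, if_neg (by omega), if_pos h3]
        by_cases h4 : j = 0
        · rw [if_pos (by omega), h4, lcsL_zero_right]
        · rw [if_neg (by omega)]
      · rw [if_neg h1, if_neg h2, if_neg (by omega), if_neg h3]

theorem rowOK_init (an bn : List String) :
    RowOK an bn (List.replicate (an.length + 1) (List.replicate (bn.length + 1) 0)) 1 0 := by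
  refine ⟨by simp, ?_, ?_⟩
  · intro i' hi'
    rw [List.getD_replicate _ (by omega : i' < an.length + 1)]
    simp
  · intro i' j hi' hj
    rw [List.getD_replicate _ (by omega : i' < an.length + 1),
      List.getD_replicate _ (by omega : j < bn.length + 1)]
    by_cases h1 : i' < 1
    · have : i' = 0 := by omega
      rw [if_pos h1, this, lcsL_zero_left]
    · by_cases h2 : i' = 1
      · rw [if_neg h1, if_pos h2]
        by_cases h4 : j = 0
        · rw [if_pos (by omega), h4, h2, lcsL_zero_right]
        · rw [if_neg (by omega)]
      · rw [if_neg h1, if_neg h2]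

theorem dpTable_rowOK (an bn : List String) :
    RowOK an bn (dpTable an bn) (an.length + 1) 0 := by
  unfold dpTable
  suffices hs : ∀ r, r ≤ an.length → RowOK an bn ((List.range' 1 r).foldl (dpRow an bn)
      (List.replicate (an.length + 1) (List.replicate (bn.length + 1) 0))) (r+1) 0 by
    exact hs an.length le_rfl
  intro r
  induction r with
  | zero => intro _; simpa using rowOK_init an bn
  | succ r ihr =>
    intro hr
    rw [List.range'_1_concat, List.foldl_append, List.foldl_cons, List.foldl_nil,
      Nat.add_comm 1 r]
    exact rowOK_succ an bn _ _ (dpRow_rowOK an bn _ (r+1) (by omega) (by omega) (ihr (by omega)))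

theorem dpTable_getD (an bn : List String) (i j : Nat) (hi : i ≤ an.length) (hj : j ≤ bn.length) :
    ((dpTable an bn).getD i []).getD j 0 = lcsL an bn i j := by
  have h := (dpTable_rowOK an bn).2.2 i j hi hj
  rw [h, if_pos (by omega)]

theorem walk_eq (an bn : List String) (anodes bnodes : List Int) :
    ∀ n i j c m, i + j ≤ n → i ≤ an.length → j ≤ bn.length → cacheValid an bn c →
      walkA an bn anodes bnodes (dpTable an bn) i j m = walkB an bn anodes bnodes i j c m := by
  intro n
  induction n with
  | zero =>
    intro i j c m hle hi hj hc
    have hi0 : i = 0 := by omega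
    subst hi0
    simp [walkA, walkB]
  | succ n ih =>
    intro i j c m hle hi hj hc
    match i, j with
    | 0, j => simp [walkA, walkB]
    | i+1, 0 => simp [walkA, walkB]
    | i+1, j+1 =>
      rw [walkA, walkB]
      by_cases heq : an.getD i "" == bn.getD j ""
      · rw [if_pos heq, if_pos heq]
        exact ih i j c _ (by omega) (by omega) (by omega) hc
      · rw [if_neg heq, if_neg heq]
        simp only []
        obtain ⟨h1, h2⟩ := lcsMemo_correct an bn (i+(j+1)) i (j+1) c le_rfl hc
        obtain ⟨h3, h4⟩ := lcsMemo_correct an bn ((i+1)+j) (i+1) j _ le_rfl h2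
        rw [dpTable_getD an bn i (j+1) (by omega) hj, dpTable_getD an bn (i+1) j hi (by omega)]
        rw [h1, h3]
        by_cases hgt : lcsL an bn (i+1) j < lcsL an bn i (j+1)
        · rw [if_pos hgt, if_pos hgt]
          exact ih i (j+1) _ m (by omega) (by omega) hj h4
        · rw [if_neg hgt, if_neg hgt]
          exact ih (i+1) j _ m (by omega) hi (by omega) h4


theorem cacheValid_empty (an bn : List String) : cacheValid an bn PySem.Dict.empty := by
  intro p v h
  rw [PySem.Dict.get?_empty] at h
  exact absurd h (by simp)

-- ===== VERDICT (by name: the statement is the Claim_ definition above) =====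
theorem rep_node_map_spec : Claim_equal_rep_node_map := by
  intro a b _
  unfold Spec_rep_node_map rep_node_map rep_node_map_alt
  simp only [PySem.List.foldl_prod_mk
      (f := fun (acc : List Int) (kv : Int × String) => acc ++ [kv.1])
      (g := fun (acc : List String) (kv : Int × String) => acc ++ [kv.2]),
    PySem.List.foldl_append_singleton_eq_map, List.nil_append]
  exact congrArg PySem.Dict.items
    (walk_eq _ _ _ _ (_ + _) _ _ _ _ le_rfl (by simp) (by simp) (cacheValid_empty _ _))
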